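-- pv_equiv track=rewrite | github.com/kikflash21/Tour-de-hanoi | PROJET FINAL.py | verifVictoire
-- ===== SOURCE A (Python) =====
-- def nbDisques(plateau, numtour) :
--     return len(plateau[numtour])
--
-- def disqueSup(plateau, numtour):
--     if numtour < 0 or numtour > 2 or len(plateau[numtour]) == 0: #on verifie si la tour est vide ou si le numéro ne correspond pas, on renvoit -1 si ces conditions sont remplies
--         return -1
--     else: #si les conditions precedentes ne sont pas remplies, on renvoit -1 le disque superieur de cette tour
--         tour = plateau[numtour]
--         return tour[-1]
--
-- def verifVictoire(plateau, n) :
--     if len(plateau) != 3: #on commence par verifier si le plateau possede le bon nombre de tours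
--         return False
--
--     elif len(plateau[0]) != 0 or len(plateau[1]) != 0: #on regarde s'il ne reste pas des disques sur les tours 1 et 2, sinon on return False
--         return False
--
--     elif len(plateau) == 3 and nbDisques(plateau, 2) == n and disqueSup(plateau, 2) == 1 : #on verifie encore si le plateau possede le bon nombre de tours, puis si tous les disque sont bien sur la derniere tour et enfin si le disque superieur est bien le plus petit
--         for x in range(0, n - 1) :  #boucle permettant de verifier si les disque dans la liste sont bien dans l'ordre decroissant (donc dans l'ordre croissant en partant du haut de la tour)
--             if plateau[2][x] <= plateau[2][x + 1] or plateau[2][x] - plateau[2][x + 1] != 1: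
--                 return False #s'ils ne sont pas dans l'ordre decroissant on return False
--         return True #si toutes les conditions sont reunies on return True
--     else :
--         return False
-- ===== SOURCE B (Python) =====
-- def verifVictoire(plateau, n):
--     if len(plateau) != 3:
--         return False
--     if len(plateau[0]) != 0 or len(plateau[1]) != 0:
--         return False
--     return n >= 1 and plateau[2] == list(range(n, 0, -1))
-- ===== Notes on version B (the rewrite author's own statement) =====
-- stated objective: simpler
-- what changed: Replaces A's index loop over adjacent pairs (plus helper calls for length and top disk) by a single equality test of the third tower against the built target list [n, n-1, ..., 1].
import Mathlib
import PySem

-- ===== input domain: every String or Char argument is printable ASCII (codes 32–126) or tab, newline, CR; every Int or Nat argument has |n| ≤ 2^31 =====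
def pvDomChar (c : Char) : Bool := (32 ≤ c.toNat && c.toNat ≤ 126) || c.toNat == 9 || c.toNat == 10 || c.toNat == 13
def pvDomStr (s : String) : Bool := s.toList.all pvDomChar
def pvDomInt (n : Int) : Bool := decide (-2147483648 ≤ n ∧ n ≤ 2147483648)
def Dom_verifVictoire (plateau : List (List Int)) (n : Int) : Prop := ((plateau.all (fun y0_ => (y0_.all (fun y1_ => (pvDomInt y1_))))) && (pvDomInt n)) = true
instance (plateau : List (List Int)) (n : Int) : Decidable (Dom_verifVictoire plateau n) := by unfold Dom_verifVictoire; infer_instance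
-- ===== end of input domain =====

-- B replaces A's index loop by one list-equality test against the target stack [n,…,1]; objective: simpler.

-- ===== PORT A =====
-- helper nbDisques: len(plateau[numtour]); none = IndexError
def nbDisques (plateau : List (List Int)) (numtour : Int) : Option Int :=
  (PySem.List.pyGet? plateau numtour).map (fun t => (t.length : Int))

-- helper disqueSup; none = IndexError
def disqueSup (plateau : List (List Int)) (numtour : Int) : Option Int :=
  if numtour < 0 ∨ numtour > 2 then some (-1)
  else
    match PySem.List.pyGet? plateau numtour with
    | none => none
    | some tour =>
      if tour.length = 0 then some (-1)
      else PySem.List.pyGet? tour (-1)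

-- the 'for x in range(0, n-1)' loop of A with its early 'return False'
def hanoiLoop (t : List Int) : List Int → Bool
  | [] => true
  | x :: rest =>
    match PySem.List.pyGet? t x, PySem.List.pyGet? t (x + 1) with
    | some a, some b => if a ≤ b ∨ a - b ≠ 1 then false else hanoiLoop t rest
    | _, _ => false   -- unreachable here: Python would raise IndexError (indices are guarded by the length check)

def verifVictoire (plateau : List (List Int)) (n : Int) : Bool :=
  if (plateau.length : Int) ≠ 3 then false
  else
    match PySem.List.pyGet? plateau 0, PySem.List.pyGet? plateau 1 with
    | some t0, some t1 =>
      if (t0.length : Int) ≠ 0 ∨ (t1.length : Int) ≠ 0 then false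
      else if ((plateau.length : Int) = 3) ∧ nbDisques plateau 2 = some n ∧ disqueSup plateau 2 = some 1 then
        match PySem.List.pyGet? plateau 2 with
        | some t2 => hanoiLoop t2 (PySem.List.pyRange 0 (n - 1) 1)
        | none => false
      else false
    | _, _ => false   -- unreachable: length = 3 guarantees the indexing succeeds

-- ===== PORT B =====
def verifVictoire_alt (plateau : List (List Int)) (n : Int) : Bool :=
  match plateau with
  | [t0, t1, t2] =>
    if t0.length ≠ 0 ∨ t1.length ≠ 0 then false
    else (1 ≤ n) && (t2 == PySem.List.pyRange n 0 (-1))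
  | _ => false

-- ===== PRECONDITION & SPEC =====
def Spec_verifVictoire (plateau : List (List Int)) (n : Int) (out : Bool) : Prop := out = verifVictoire_alt plateau n
instance (plateau : List (List Int)) (n : Int) (out : Bool) : Decidable (Spec_verifVictoire plateau n out) := by unfold Spec_verifVictoire; infer_instance

-- ===== CLAIM (what is proved, stated in full; the proofs are below) =====
def Claim_equal_verifVictoire : Prop := ∀ (plateau : List (List Int)) (n : Int), Dom_verifVictoire plateau n → Spec_verifVictoire plateau n (verifVictoire plateau n)

-- ===== LEMMAS AND PROOFS =====

-- the target stack [k, k-1, …, 1]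
def down : Nat → List Int
  | 0 => []
  | k + 1 => ((k : Int) + 1) :: down k

-- the adjacent-pair condition of A's loop, structurally
def chainB : List Int → Bool
  | [] => true
  | [_] => true
  | a :: b :: r => (a == b + 1) && chainB (b :: r)

theorem length_down (k : Nat) : (down k).length = k := by
  induction k with
  | zero => rfl
  | succ k ih => simp [down, ih]

theorem pyRange_down_nat (k : Nat) : PySem.List.pyRange (k : Int) 0 (-1) = down k := by
  induction k with
  | zero => simp [PySem.List.pyRange_neg_one_eq_nil, down]
  | succ k ih =>
    rw [PySem.List.pyRange_neg_one_cons (by exact_mod_cast Nat.succ_pos k)]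
    simp [down, ← ih]

theorem pyRange_down (n : Int) : PySem.List.pyRange n 0 (-1) = down n.toNat := by
  rcases le_or_gt n 0 with h | h
  · rw [PySem.List.pyRange_neg_one_eq_nil h]
    rw [Int.toNat_of_nonpos h]; rfl
  · have hn : ((n.toNat : Int)) = n := Int.toNat_of_nonneg h.le
    conv_lhs => rw [← hn]
    rw [pyRange_down_nat]

theorem loop_eq (u : List Int) : ∀ (t : List Int) (k : Nat), t.drop k = u →
    hanoiLoop t (PySem.List.pyRange (k : Int) ((t.length : Int) - 1) 1) = chainB u := by
  induction u with
  | nil =>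
    intro t k hd
    have hk : t.length ≤ k := by
      by_contra h
      have := List.drop_eq_nil_iff.mp hd
      omega
    rw [PySem.List.pyRange_one_eq_nil (by omega)]
    rfl
  | cons a rest ih =>
    intro t k hd
    have hk : k < t.length := by
      by_contra h
      rw [List.drop_eq_nil_of_le (by omega)] at hd
      simp at hd
    have hga : t[k]? = some a := by
      have h : (t.drop k)[0]? = t[k + 0]? := List.getElem?_drop
      rw [hd] at h; simpa using h.symm
    have hdrop1 : t.drop (k + 1) = rest := by
      have h := congrArg (List.drop 1) hd
      rw [List.drop_drop] at h
      simpa [Nat.add_comm] using h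
    cases rest with
    | nil =>
      have hlen : t.length = k + 1 := by
        have := congrArg List.length hd
        simp at this; omega
      rw [PySem.List.pyRange_one_eq_nil (by omega)]
      rfl
    | cons b r =>
      have hk1 : k + 1 < t.length := by
        have := congrArg List.length hdrop1
        simp at this; omega
      have hgb : t[k + 1]? = some b := by
        have h : (t.drop (k + 1))[0]? = t[(k + 1) + 0]? := List.getElem?_drop
        rw [hdrop1] at h; simpa using h.symm
      rw [PySem.List.pyRange_one_cons (by omega)]
      show (match PySem.List.pyGet? t (k : Int), PySem.List.pyGet? t ((k : Int) + 1) with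
        | some a, some b => if a ≤ b ∨ a - b ≠ 1 then false else hanoiLoop t (PySem.List.pyRange ((k : Int) + 1) ((t.length : Int) - 1) 1)
        | _, _ => false) = chainB (a :: b :: r)
      have e1 : PySem.List.pyGet? t (k : Int) = some a := by
        rw [PySem.List.pyGet?_natCast]; exact hga
      have e2 : PySem.List.pyGet? t ((k : Int) + 1) = some b := by
        have : ((k : Int) + 1) = ((k + 1 : Nat) : Int) := by push_cast; ring
        rw [this, PySem.List.pyGet?_natCast]; exact hgb
      rw [e1, e2]
      show (if a ≤ b ∨ a - b ≠ 1 then false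
            else hanoiLoop t (PySem.List.pyRange ((k : Int) + 1) ((t.length : Int) - 1) 1)) = chainB (a :: b :: r)
      have hrec := ih t (k + 1) hdrop1
      by_cases hab : a = b + 1
      · have hcond : ¬ (a ≤ b ∨ a - b ≠ 1) := by omega
        rw [if_neg hcond]
        have : ((k + 1 : Nat) : Int) = (k : Int) + 1 := by push_cast; ring
        rw [this] at hrec
        rw [hrec]
        simp [chainB, hab]
      · have hcond : a ≤ b ∨ a - b ≠ 1 := by omega
        rw [if_pos hcond]
        simp [chainB]
        intro h; exact absurd h hab

theorem chain_char : ∀ t : List Int, (chainB t = true ∧ t.getLast? = some 1) ↔ (t = down t.length ∧ t ≠ []) := by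
  intro t
  induction t with
  | nil => simp [chainB]
  | cons a u ih =>
    cases u with
    | nil =>
      simp [chainB, down]
    | cons b r =>
      have hlast : (a :: b :: r).getLast? = (b :: r).getLast? := by
        simp [List.getLast?_cons_cons]
      constructor
      · rintro ⟨hc, hl⟩
        rw [hlast] at hl
        simp [chainB] at hc
        obtain ⟨hab, hcb⟩ := hc
        have hthis := (ih).mp ⟨hcb, hl⟩
        have hbr : b :: r = down (r.length + 1) := by
          simpa using hthis.1
        have hb : b = (r.length : Int) + 1 := by
          rw [down] at hbr
          exact (List.cons_eq_cons.mp hbr).1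
        refine ⟨?_, by simp⟩
        simp only [List.length_cons]
        show a :: b :: r = down (r.length + 1 + 1)
        rw [down]
        exact List.cons_eq_cons.mpr ⟨by push_cast; omega, hbr⟩
      · rintro ⟨heq, -⟩
        simp [List.length] at heq
        rw [show r.length + 1 + 1 = (r.length + 1) + 1 from rfl, down] at heq
        obtain ⟨ha, htail⟩ := List.cons_eq_cons.mp heq
        have hb : b = (r.length : Int) + 1 := by
          rw [down] at htail
          simpa using (List.cons_eq_cons.mp htail).1
        have h2 := (ih).mpr ⟨by simpa using htail, by simp⟩
        rw [hlast]
        refine ⟨?_, h2.2⟩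
        simp [chainB]
        refine ⟨by omega, h2.1⟩

-- main case: plateau = [t0, t1, t2]
theorem main_case (t0 t1 t2 : List Int) (n : Int) :
    verifVictoire [t0, t1, t2] n = verifVictoire_alt [t0, t1, t2] n := by
  have hA3 : ¬ (((3 : Nat) : Int) ≠ 3) := by norm_num
  have g0 : PySem.List.pyGet? [t0, t1, t2] 0 = some t0 := PySem.List.pyGet?_zero_cons ..
  have g1 : PySem.List.pyGet? [t0, t1, t2] 1 = some t1 := by
    simp [PySem.List.pyGet?, PySem.List.pyIdx?]
  have g2 : PySem.List.pyGet? [t0, t1, t2] 2 = some t2 := by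
    simp [PySem.List.pyGet?, PySem.List.pyIdx?]
  unfold verifVictoire verifVictoire_alt
  rw [g0, g1]
  simp only [List.length_cons, List.length_nil]
  by_cases h01 : (t0.length : Int) ≠ 0 ∨ (t1.length : Int) ≠ 0
  · rw [if_neg hA3, if_pos h01]
    have h01' : t0.length ≠ 0 ∨ t1.length ≠ 0 := by omega
    rw [if_pos h01']
  · rw [if_neg hA3, if_neg h01]
    have h01' : ¬ (t0.length ≠ 0 ∨ t1.length ≠ 0) := by omega
    rw [if_neg h01']
    -- reduce nbDisques / disqueSup on this board
    have hnb : nbDisques [t0, t1, t2] 2 = some (t2.length : Int) := by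
      unfold nbDisques; rw [g2]; rfl
    have hds : disqueSup [t0, t1, t2] 2 =
        (if t2.length = 0 then some (-1) else PySem.List.pyGet? t2 (-1)) := by
      unfold disqueSup
      rw [if_neg (by norm_num), g2]
    rw [pyRange_down]
    by_cases hlen : (t2.length : Int) = n
    · by_cases hnil : t2 = []
      · -- n = 0: A's disqueSup is -1 ≠ 1; B's 1 ≤ n fails
        subst hnil
        simp at hlen
        rw [if_neg (by rw [hds]; simp), ← hlen]
        simp
      · have hds2 : disqueSup [t0, t1, t2] 2 = t2.getLast? := by
          rw [hds, if_neg (by simpa [List.length_eq_zero_iff] using hnil), PySem.List.pyGet?_neg_one]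
        by_cases hlast : t2.getLast? = some 1
        · rw [if_pos ⟨by norm_num, by rw [hnb, hlen], by rw [hds2]; exact hlast⟩, g2]
          have hloop : hanoiLoop t2 (PySem.List.pyRange 0 (n - 1) 1) = chainB t2 := by
            have := loop_eq t2 t2 0 (by simp)
            simpa [← hlen] using this
          show hanoiLoop t2 (PySem.List.pyRange 0 (n - 1) 1) = (decide (1 ≤ n) && (t2 == down n.toNat))
          rw [hloop]
          have hn1 : 1 ≤ n := by
            have : t2.length ≠ 0 := by simpa [List.length_eq_zero_iff] using hnil
            omega
          have htn : n.toNat = t2.length := by omega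
          rw [htn]
          by_cases hd : t2 = down t2.length
          · have hcc := (chain_char t2).mpr ⟨hd, hnil⟩
            rw [hcc.1]
            symm
            simp only [Bool.and_eq_true, decide_eq_true_eq, beq_iff_eq]
            exact ⟨hn1, hd⟩
          · have hc : chainB t2 ≠ true := fun hc => hd ((chain_char t2).mp ⟨hc, hlast⟩).1
            simp only [Bool.not_eq_true] at hc
            rw [hc]
            symm
            simp only [Bool.and_eq_false_iff, beq_eq_false_iff_ne, ne_eq]
            right
            exact hd
        · -- top disk isn't 1: A false; B false since down's last element is 1
          rw [if_neg (by rintro ⟨-, -, h⟩; rw [hds2] at h; exact hlast h)]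
          symm
          simp only [Bool.and_eq_false_iff]
          by_cases hn1 : 1 ≤ n
          · right
            simp only [beq_eq_false_iff_ne, ne_eq]
            intro hd
            have hlen2 : (down n.toNat).length = n.toNat := length_down n.toNat
            have : t2.length = n.toNat := by rw [hd, hlen2]
            have := (chain_char t2).mpr ⟨by rw [this]; exact hd, hnil⟩
            exact hlast this.2
          · left; simpa using hn1
    · -- lengths disagree: A false; B false since down n.toNat has length n
      rw [if_neg (by rintro ⟨-, h, -⟩; rw [hnb] at h; exact hlen (Option.some.inj h))]
      symm
      simp only [Bool.and_eq_false_iff]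
      by_cases hn1 : 1 ≤ n
      · right
        simp only [beq_eq_false_iff_ne, ne_eq]
        intro hd
        have : t2.length = n.toNat := by rw [hd, length_down]
        omega
      · left; simpa using hn1

-- ===== VERDICT (by name: the statement is the Claim_ definition above) =====
theorem verifVictoire_spec : Claim_equal_verifVictoire := by
  intro plateau n _
  unfold Spec_verifVictoire
  match plateau with
  | [] => rfl
  | [_] => rfl
  | [_, _] => rfl
  | [t0, t1, t2] => exact main_case t0 t1 t2 n
  | _ :: _ :: _ :: x :: rest =>
    unfold verifVictoire verifVictoire_alt
    rw [if_pos (by simp; omega)]
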